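-- pv_equiv track=rewrite | github.com/jooyun-1/PS_repo | Practice/week3/모의고사.py | solution
-- ===== SOURCE A (Python) =====
-- def solution(answers):
--     answer = []
--     supo1 = [1,2,3,4,5]
--     supo2 = [2,1,2,3,2,4,2,5]
--     supo3 = [3,3,1,1,2,2,4,4,5,5]
--     cnt1, cnt2 , cnt3 = 0, 0, 0
--
--     for i in range(len(answers)) :
--         index1, index2, index3 = i % 5, i % 8, i % 10
--
--         if answers[i] == supo1[index1] :
--             cnt1 += 1
--         if answers[i] == supo2[index2] :
--             cnt2 += 1
--         if answers[i] == supo3[index3] :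
--             cnt3 += 1
--
--     result = max(cnt1, cnt2, cnt3)
--
--     if result == cnt1 :
--         answer.append(1)
--     if result == cnt2 :
--         answer.append(2)
--     if result == cnt3 :
--         answer.append(3)
--
--     return answer
-- ===== SOURCE B (Python) =====
-- def solution(answers):
--     # One pass builds a histogram keyed by (position mod 40, answer); 40 = lcm of the
--     # three pattern lengths, so each pattern's score is then read off the histogram
--     # in O(40) lookups without rescanning the answers.
--     hist = {}
--     for i, a in enumerate(answers):
--         key = (i % 40, a)
--         hist[key] = hist.get(key, 0) + 1
--     patterns = [[1, 2, 3, 4, 5],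
--                 [2, 1, 2, 3, 2, 4, 2, 5],
--                 [3, 3, 1, 1, 2, 2, 4, 4, 5, 5]]
--     counts = [sum(hist.get((r, p[r % len(p)]), 0) for r in range(40))
--               for p in patterns]
--     m = max(counts)
--     return [k for k in [1, 2, 3] if counts[k - 1] == m]
-- ===== Notes on version B (the rewrite author's own statement) =====
-- stated objective: alternative
-- what changed: Instead of matching each answer against the cycling patterns, B makes one pass building a histogram keyed by (index mod 40, answer) (40 = lcm of pattern lengths) and then computes each pattern's score from 40 histogram lookups, selecting the winners in order by a filter over the pattern numbers.
import Mathlib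
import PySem

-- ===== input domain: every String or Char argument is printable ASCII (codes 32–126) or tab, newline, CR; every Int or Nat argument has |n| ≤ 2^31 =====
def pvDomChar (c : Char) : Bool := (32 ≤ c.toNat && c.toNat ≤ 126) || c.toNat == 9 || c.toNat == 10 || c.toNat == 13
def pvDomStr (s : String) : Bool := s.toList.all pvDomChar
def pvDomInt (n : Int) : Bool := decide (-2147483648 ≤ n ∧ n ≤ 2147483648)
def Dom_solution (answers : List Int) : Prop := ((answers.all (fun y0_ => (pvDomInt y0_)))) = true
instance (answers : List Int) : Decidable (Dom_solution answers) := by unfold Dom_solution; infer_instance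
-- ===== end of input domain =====

-- B replaces A's per-index pattern matching by a one-pass histogram keyed by
-- (index mod 40, answer) (40 = lcm of the pattern lengths), from which each
-- pattern's score is read off in 40 lookups; same O(n) cost, different structure.

-- ===== PORT A =====
def solution (answers : List Int) : List Int :=
  let supo1 : List Int := [1,2,3,4,5]
  let supo2 : List Int := [2,1,2,3,2,4,2,5]
  let supo3 : List Int := [3,3,1,1,2,2,4,4,5,5]
  let cnts : Int × Int × Int :=
    (PySem.List.pyRange 0 answers.length 1).foldl
      (fun (c : Int × Int × Int) i =>
        let index1 := PySem.Int.mod i 5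
        let index2 := PySem.Int.mod i 8
        let index3 := PySem.Int.mod i 10
        ((if PySem.List.pyGetD answers i 0 = PySem.List.pyGetD supo1 index1 0 then c.1 + 1 else c.1),
         (if PySem.List.pyGetD answers i 0 = PySem.List.pyGetD supo2 index2 0 then c.2.1 + 1 else c.2.1),
         (if PySem.List.pyGetD answers i 0 = PySem.List.pyGetD supo3 index3 0 then c.2.2 + 1 else c.2.2)))
      (0, 0, 0)
  let result := max cnts.1 (max cnts.2.1 cnts.2.2)
  (if result = cnts.1 then [1] else []) ++
  (if result = cnts.2.1 then [2] else []) ++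
  (if result = cnts.2.2 then ([3] : List Int) else [])

-- ===== PORT B =====
-- hist[key] = hist.get(key, 0) + 1 over enumerate(answers), key = (i % 40, a)
def solution_alt (answers : List Int) : List Int :=
  let hist : PySem.Dict (Int × Int) Int :=
    (PySem.List.enumerate answers 0).foldl
      (fun d q =>
        d.insert (PySem.Int.mod q.1 40, q.2)
          (d.getD (PySem.Int.mod q.1 40, q.2) 0 + 1))
      PySem.Dict.empty
  let patterns : List (List Int) := [[1,2,3,4,5],[2,1,2,3,2,4,2,5],[3,3,1,1,2,2,4,4,5,5]]
  let counts : List Int := patterns.map (fun p =>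
    ((PySem.List.pyRange 0 40 1).map
       (fun r => hist.getD (r, PySem.List.pyGetD p (PySem.Int.mod r (p.length : Int)) 0) 0)).sum)
  match PySem.List.max? counts (fun y => y) with
  | none => []
  | some m => ([1,2,3] : List Int).filter
      (fun k => PySem.List.pyGetD counts (k - 1) 0 == m)

-- ===== PRECONDITION & SPEC =====
def Spec_solution (answers : List Int) (out : List Int) : Prop := out = solution_alt answers
instance (answers : List Int) (out : List Int) : Decidable (Spec_solution answers out) := by unfold Spec_solution; infer_instance

-- ===== CLAIM =====
def Claim_equal_solution : Prop := ∀ (answers : List Int), Dom_solution answers → Spec_solution answers (solution answers)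

-- ===== LEMMAS AND PROOFS =====

-- the key list underlying B's histogram
def pvKeys (answers : List Int) : List (Int × Int) :=
  (PySem.List.enumerate answers 0).map (fun q => (PySem.Int.mod q.1 40, q.2))

-- B's histogram is the counter of pvKeys
theorem pv_hist_getD (answers : List Int) (v : Int × Int) :
    ((PySem.List.enumerate answers 0).foldl
      (fun d q =>
        d.insert (PySem.Int.mod q.1 40, q.2)
          (d.getD (PySem.Int.mod q.1 40, q.2) 0 + 1))
      PySem.Dict.empty).getD v 0 = ((pvKeys answers).count v : Int) := by
  rw [pvKeys]
  suffices h : ∀ (l : List (Int × Int)) (d : PySem.Dict (Int × Int) Int),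
      (l.foldl (fun d q =>
          d.insert (PySem.Int.mod q.1 40, q.2)
            (d.getD (PySem.Int.mod q.1 40, q.2) 0 + 1)) d).getD v 0
        = d.getD v 0 + (List.count v (l.map (fun q => (PySem.Int.mod q.1 40, q.2))) : Int) by
    rw [h]; simp
  intro l
  induction l with
  | nil => intro d; simp
  | cons x t ih =>
      intro d
      rw [List.foldl_cons, ih, PySem.Dict.getD_insert, List.map_cons, List.count_cons]
      by_cases h : v = (PySem.Int.mod x.1 40, x.2)
      · rw [if_pos h, if_pos (beq_iff_eq.mpr h.symm), h]
        push_cast; ring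
      · rw [if_neg h, if_neg (fun hb => h (beq_iff_eq.mp hb).symm)]
        push_cast; ring

-- summing an indicator of q over a nodup list containing q.1 once
theorem pv_ind (g : Int → Int) (q : Int × Int) :
    ∀ (R : List Int), R.Nodup → q.1 ∈ R →
    (R.map (fun r => if q = (r, g r) then (1 : Int) else 0)).sum
      = if q.2 = g q.1 then 1 else 0 := by
  intro R
  induction R with
  | nil => intro _ h; cases h
  | cons r R' ih =>
      intro hnd hmem
      rcases List.nodup_cons.mp hnd with ⟨hr, hnd'⟩
      simp only [List.map_cons, List.sum_cons]
      by_cases h1 : q.1 = r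
      · have hz : (R'.map (fun r => if q = (r, g r) then (1 : Int) else 0)).sum = 0 := by
          apply List.sum_eq_zero
          intro x hx
          rcases List.mem_map.mp hx with ⟨r', hr', rfl⟩
          have : ¬ q = (r', g r') := by
            intro he; apply hr; rw [← h1, he]; exact hr'
          simp [this]
        rw [hz, add_zero]
        by_cases h2 : q.2 = g q.1
        · have hqe : q = (r, g r) := Prod.ext_iff.mpr ⟨h1, by rw [h2, h1]⟩
          simp [hqe]
        · have hne : ¬ q = (r, g r) := fun he => h2 (by subst he; rfl)
          simp [hne, h2]
      · have hmem' : q.1 ∈ R' := by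
          rcases List.mem_cons.mp hmem with h | h
          · exact absurd h h1
          · exact h
        have hq : ¬ q = (r, g r) := by
          intro he; apply h1; rw [he]
        rw [if_neg hq, zero_add]
        exact ih hnd' hmem'

-- summing per-residue counts over all residues gives a countP
theorem pv_sum_count (g : Int → Int) (R : List Int) (hR : R.Nodup) :
    ∀ (keys : List (Int × Int)), (∀ q ∈ keys, q.1 ∈ R) →
    (R.map (fun r => ((keys.count (r, g r) : Int)))).sum
      = (keys.countP (fun q => decide (q.2 = g q.1)) : Int) := by
  intro keys
  induction keys with
  | nil => intro _; simp
  | cons q t ih =>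
      intro hmem
      have ht : ∀ p ∈ t, p.1 ∈ R := fun p hp => hmem p (List.mem_cons_of_mem q hp)
      have hq : q.1 ∈ R := hmem q List.mem_cons_self
      simp only [List.count_cons, List.countP_cons, decide_eq_true_eq]
      have hstep : (fun r : Int => ((t.count (r, g r) + if q == (r, g r) then 1 else 0 : Nat) : Int))
          = fun r => ((t.count (r, g r) : Int)) + (if q = (r, g r) then (1 : Int) else 0) := by
        funext r; by_cases h : q = (r, g r) <;> simp [h]
      rw [hstep, PySem.List.sum_map_add_int, ih ht, pv_ind g q R hR hq]
      by_cases h : q.2 = g q.1 <;> simp [h]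

-- residues: (j % 40) % L = j % L when L divides 40
theorem pv_mod_mod (j L : Int) (hL : 0 < L) (hdvd : L ∣ 40) :
    PySem.Int.mod (PySem.Int.mod j 40) L = PySem.Int.mod j L := by
  simp only [PySem.Int.mod_eq_emod_of_pos hL,
    PySem.Int.mod_eq_emod_of_pos (show (0 : Int) < 40 by norm_num)]
  exact Int.emod_emod_of_dvd j hdvd

-- B's per-pattern histogram sum equals a direct countP over the indices
theorem pv_count_eq (answers p : List Int) (L : Int) (hlen : (p.length : Int) = L)
    (hL : 0 < L) (hdvd : L ∣ 40) :
    ((PySem.List.pyRange 0 40 1).map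
       (fun r => ((pvKeys answers).count
          (r, PySem.List.pyGetD p (PySem.Int.mod r (p.length : Int)) 0) : Int))).sum
      = ((PySem.List.pyRange 0 (answers.length : Int) 1).countP
          (fun j => decide (PySem.List.pyGetD answers j 0
                      = PySem.List.pyGetD p (PySem.Int.mod j L) 0)) : Int) := by
  rw [hlen]
  have hmem : ∀ q ∈ pvKeys answers, q.1 ∈ PySem.List.pyRange 0 40 1 := by
    intro q hq
    rw [pvKeys] at hq
    rcases List.mem_map.mp hq with ⟨e, _, rfl⟩
    rw [PySem.List.mem_pyRange_one]
    exact ⟨PySem.Int.mod_nonneg _ (by norm_num), PySem.Int.mod_lt _ (by norm_num)⟩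
  rw [pv_sum_count (fun r => PySem.List.pyGetD p (PySem.Int.mod r L) 0)
        (PySem.List.pyRange 0 40 1) (PySem.List.nodup_pyRange_one 0 40) (pvKeys answers) hmem]
  congr 1
  rw [pvKeys, List.countP_map,
      PySem.List.enumerate_eq_map_pyRange answers 0, List.countP_map,
      PySem.List.len_eq]
  apply List.countP_congr
  intro j hj
  simp only [Function.comp_apply, decide_eq_true_eq]
  rw [pv_mod_mod j L hL hdvd]

-- A's triple-accumulator loop is three independent counts
theorem pv_foldl_triple (l : List Int) (g1 g2 g3 : Int → Prop)
    [DecidablePred g1] [DecidablePred g2] [DecidablePred g3] (a b c : Int) :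
    l.foldl (fun (s : Int × Int × Int) i =>
        ((if g1 i then s.1 + 1 else s.1),
         (if g2 i then s.2.1 + 1 else s.2.1),
         (if g3 i then s.2.2 + 1 else s.2.2))) (a, b, c)
    = (a + (l.countP (fun i => decide (g1 i)) : Int),
       b + (l.countP (fun i => decide (g2 i)) : Int),
       c + (l.countP (fun i => decide (g3 i)) : Int)) := by
  induction l generalizing a b c with
  | nil => simp
  | cons x t ih =>
      simp only [List.foldl_cons, List.countP_cons, decide_eq_true_eq, ih]
      split_ifs <;> simp only [Prod.mk.injEq] <;>
        refine ⟨by push_cast; ring, by push_cast; ring, by push_cast; ring⟩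

-- the selection step coincides for any counts triple
theorem pv_select (c1 c2 c3 : Int) :
    ((if max c1 (max c2 c3) = c1 then [1] else []) ++
     (if max c1 (max c2 c3) = c2 then [2] else []) ++
     (if max c1 (max c2 c3) = c3 then ([3] : List Int) else []))
    = (match PySem.List.max? [c1, c2, c3] (fun y => y) with
       | none => []
       | some m => ([1,2,3] : List Int).filter
           (fun k => PySem.List.pyGetD [c1, c2, c3] (k - 1) 0 == m)) := by
  rw [PySem.List.max?_id_cons]
  have hm : [c2, c3].foldl max c1 = max c1 (max c2 c3) := by
    simp [List.foldl, max_assoc]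
  rw [hm]
  obtain ⟨M, hM⟩ : ∃ M, max c1 (max c2 c3) = M := ⟨_, rfl⟩
  rw [hM]
  simp only [List.filter_cons, List.filter_nil]
  norm_num [PySem.List.pyGetD_ofNat']
  split_ifs <;> first | rfl | (exfalso; omega)

-- ===== VERDICT =====
theorem solution_spec : Claim_equal_solution := by
  intro answers _
  show solution answers = solution_alt answers
  rw [solution, solution_alt]
  simp only [List.map_cons, List.map_nil, pv_hist_getD]
  rw [pv_count_eq answers [1,2,3,4,5] 5 (by norm_num) (by norm_num) (by norm_num),
      pv_count_eq answers [2,1,2,3,2,4,2,5] 8 (by norm_num) (by norm_num) (by norm_num),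
      pv_count_eq answers [3,3,1,1,2,2,4,4,5,5] 10 (by norm_num) (by norm_num) (by norm_num)]
  rw [pv_foldl_triple
        (g1 := fun i => PySem.List.pyGetD answers i 0 = PySem.List.pyGetD [1,2,3,4,5] (PySem.Int.mod i 5) 0)
        (g2 := fun i => PySem.List.pyGetD answers i 0 = PySem.List.pyGetD [2,1,2,3,2,4,2,5] (PySem.Int.mod i 8) 0)
        (g3 := fun i => PySem.List.pyGetD answers i 0 = PySem.List.pyGetD [3,3,1,1,2,2,4,4,5,5] (PySem.Int.mod i 10) 0)]
  simp only [zero_add]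
  exact pv_select _ _ _
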